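-- pv_equiv track=rewrite | github.com/zeytunyan/caesar_cipher | break_py/Взлом.py | make_letters_replacements
-- ===== SOURCE A (Python) =====
-- def make_letters_replacements(word1, word2, trusted_ltr):
--     letters_replacements = []
--     for letter1, letter2 in zip(word1, word2):
--         if letter1 != letter2:
--             if letter1 in trusted_ltr or letter2 in trusted_ltr:
--                 return
--             elif (letter1, letter2) not in letters_replacements:
--                 letters_replacements.append((letter1, letter2))
--     return letters_replacements
-- ===== SOURCE B (Python) =====
-- def make_letters_replacements(word1, word2, trusted_ltr):
--     diffs = [(a, b) for a, b in zip(word1, word2) if a != b]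
--     if any(a in trusted_ltr or b in trusted_ltr for a, b in diffs):
--         return None
--     return list(dict.fromkeys(diffs))
-- ===== Notes on version B (the rewrite author's own statement) =====
-- stated objective: idiomatic
-- what changed: A's single fused loop with early return and an in-place dedup check is split into three passes: a zip-filter building the differing pairs, one any() pass that aborts on trusted letters, and an order-preserving dedup via dict.fromkeys.
import Mathlib
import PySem

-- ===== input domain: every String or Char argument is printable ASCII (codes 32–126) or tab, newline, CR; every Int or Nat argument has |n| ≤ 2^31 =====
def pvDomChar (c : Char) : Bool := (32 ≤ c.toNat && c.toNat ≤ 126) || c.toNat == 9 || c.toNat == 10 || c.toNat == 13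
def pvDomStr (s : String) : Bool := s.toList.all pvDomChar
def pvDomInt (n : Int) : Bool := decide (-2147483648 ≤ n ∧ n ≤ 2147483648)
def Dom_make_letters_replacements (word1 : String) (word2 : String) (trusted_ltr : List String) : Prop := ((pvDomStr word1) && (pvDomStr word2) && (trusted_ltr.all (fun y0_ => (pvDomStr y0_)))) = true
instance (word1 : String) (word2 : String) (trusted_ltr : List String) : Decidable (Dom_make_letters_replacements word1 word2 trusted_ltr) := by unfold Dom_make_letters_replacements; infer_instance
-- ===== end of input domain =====

-- B splits A's fused loop (early return + in-place dedup) into three passes: filter differing pairs, abort-check against trusted letters, order-preserving dedup.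


-- ===== PORT A =====
-- A's loop over zip(word1, word2): early return none on a trusted differing letter,
-- otherwise append the pair if not yet present.
def mlrLoopA (trusted_ltr : List String) : List (Char × Char) → List (String × String) → Option (List (String × String))
  | [], acc => some acc
  | (c1, c2) :: rest, acc =>
    if c1 ≠ c2 then
      if String.singleton c1 ∈ trusted_ltr ∨ String.singleton c2 ∈ trusted_ltr then none
      else if (String.singleton c1, String.singleton c2) ∈ acc then mlrLoopA trusted_ltr rest acc
      else mlrLoopA trusted_ltr rest (acc ++ [(String.singleton c1, String.singleton c2)])
    else mlrLoopA trusted_ltr rest acc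

def make_letters_replacements (word1 : String) (word2 : String) (trusted_ltr : List String) : Option (List (String × String)) :=
  mlrLoopA trusted_ltr (word1.toList.zip word2.toList) []

-- ===== PORT B =====
-- Pass 1: differing pairs; Pass 2: any() trusted check; Pass 3: dict.fromkeys dedup.
def make_letters_replacements_alt (word1 : String) (word2 : String) (trusted_ltr : List String) : Option (List (String × String)) :=
  let diffs := ((word1.toList.zip word2.toList).filter (fun p => p.1 ≠ p.2)).map
      (fun p => (String.singleton p.1, String.singleton p.2))
  if diffs.any (fun p => decide (p.1 ∈ trusted_ltr) || decide (p.2 ∈ trusted_ltr)) then none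
  else some (diffs.foldl (fun acc p => if p ∈ acc then acc else acc ++ [p]) [])

-- ===== PRECONDITION & SPEC =====
def Spec_make_letters_replacements (word1 : String) (word2 : String) (trusted_ltr : List String) (out : Option (List (String × String))) : Prop := out = make_letters_replacements_alt word1 word2 trusted_ltr
instance (word1 : String) (word2 : String) (trusted_ltr : List String) (out : Option (List (String × String))) : Decidable (Spec_make_letters_replacements word1 word2 trusted_ltr out) := by unfold Spec_make_letters_replacements; infer_instance

-- ===== CLAIM (what is proved, stated in full; the proofs are below) =====
def Claim_equal_make_letters_replacements : Prop := ∀ (word1 : String) (word2 : String) (trusted_ltr : List String), Dom_make_letters_replacements word1 word2 trusted_ltr → Spec_make_letters_replacements word1 word2 trusted_ltr (make_letters_replacements word1 word2 trusted_ltr)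

-- ===== LEMMAS AND PROOFS =====
theorem mlrLoopA_eq (trusted_ltr : List String) :
    ∀ (ps : List (Char × Char)) (acc : List (String × String)),
      mlrLoopA trusted_ltr ps acc =
        (let diffs := (ps.filter (fun p => p.1 ≠ p.2)).map
            (fun p => (String.singleton p.1, String.singleton p.2));
         if diffs.any (fun p => decide (p.1 ∈ trusted_ltr) || decide (p.2 ∈ trusted_ltr)) then none
         else some (diffs.foldl (fun acc p => if p ∈ acc then acc else acc ++ [p]) acc)) := by
  intro ps
  induction ps with
  | nil => intro acc; simp [mlrLoopA]
  | cons hd tl ih =>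
    intro acc
    obtain ⟨c1, c2⟩ := hd
    by_cases hne : c1 = c2
    · simp [mlrLoopA, hne, ih]
    · by_cases ht : String.singleton c1 ∈ trusted_ltr ∨ String.singleton c2 ∈ trusted_ltr
      · simp only [mlrLoopA, if_pos hne, if_pos ht]
        simp [hne, List.any_cons]
        tauto
      · by_cases hmem : (String.singleton c1, String.singleton c2) ∈ acc <;>
          simp_all [mlrLoopA, List.any_cons]

-- ===== VERDICT (by name: the statement is the Claim_ definition above) =====
theorem make_letters_replacements_spec : Claim_equal_make_letters_replacements := by
  intro word1 word2 trusted_ltr _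
  unfold Spec_make_letters_replacements make_letters_replacements make_letters_replacements_alt
  rw [mlrLoopA_eq]
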